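-- pv_equiv track=rewrite | github.com/batukochan/VSCode-Ecodation | 04_liste_string_metodlar.py/dictionary_quiz.py | alfanumerik
-- ===== SOURCE A (Python) =====
-- def alfanumerik(sozluk):
--
--     silinecekKeytler = []
--     for key in sozluk.keys():
--         if not str(key).isalpha():
--             silinecekKeytler.append(key)
--     # silinecek keyler doldu
--     for key in silinecekKeytler:
--         if key in sozluk.keys():
--             sozluk.pop(key)
--
--     return sozluk
-- ===== SOURCE B (Python) =====
-- def alfanumerik(sozluk):
--     # stage 1: destructively drain the dict onto a LIFO stack
--     stack = []
--     while sozluk: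
--         stack.append(sozluk.popitem())
--     # stage 2: rebuild the (now empty) dict by popping the stack,
--     # reinserting only the alphabetic keys (original order restored)
--     while stack:
--         k, v = stack.pop()
--         if str(k).isalpha():
--             sozluk[k] = v
--     return sozluk
-- ===== Notes on version B (the rewrite author's own statement) =====
-- stated objective: alternative
-- what changed: A scans for the non-alphabetic keys, stores them in a list and then pops each from the dict with a membership re-check; B instead destructively drains the whole dict onto an explicit LIFO stack via popitem and then rebuilds the empty dict by popping the stack and reinserting only the alphabetic keys, restoring the original order.
import Mathlib
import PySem

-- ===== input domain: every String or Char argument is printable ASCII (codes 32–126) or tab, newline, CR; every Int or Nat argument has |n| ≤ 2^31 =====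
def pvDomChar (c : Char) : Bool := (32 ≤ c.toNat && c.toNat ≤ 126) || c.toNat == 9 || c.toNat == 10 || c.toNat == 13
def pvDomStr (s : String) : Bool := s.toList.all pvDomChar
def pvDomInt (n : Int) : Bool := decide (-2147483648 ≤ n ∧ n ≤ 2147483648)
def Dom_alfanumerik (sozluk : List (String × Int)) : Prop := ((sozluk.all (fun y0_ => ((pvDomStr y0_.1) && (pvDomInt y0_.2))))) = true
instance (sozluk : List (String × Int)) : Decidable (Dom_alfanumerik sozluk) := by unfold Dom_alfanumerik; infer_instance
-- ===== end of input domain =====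

-- B drains the whole dict onto a LIFO stack (popitem) and rebuilds it by popping the stack,
-- reinserting only alphabetic keys; equivalence is about the RETURN value (both Pythons
-- mutate and return the same dict object).

-- ===== PORT A =====
-- first loop: collect the keys that are not alphabetic
-- second loop: pop each collected key (with A's `key in sozluk.keys()` re-check)
def alfanumerik (sozluk : List (String × Int)) : List (String × Int) :=
  let silinecekKeytler :=
    (sozluk.map Prod.fst).foldl
      (fun acc key => if !(PySem.Str.strIsalpha key) then acc ++ [key] else acc) []
  silinecekKeytler.foldl
    (fun d key =>
      if (d.map Prod.fst).contains key then d.filter (fun kv => kv.1 != key) else d)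
    sozluk

-- ===== PORT B =====
-- Python `sozluk[k] = v` on the association list (overwrite in place, new keys append)
def pvSetItem (d : List (String × Int)) (k : String) (v : Int) : List (String × Int) :=
  if (d.map Prod.fst).contains k
    then d.map (fun kv => if kv.1 == k then (k, v) else kv)
    else d ++ [(k, v)]

-- stage 1 of B: `while sozluk: stack.append(sozluk.popitem())` — popitem takes the LAST item
def pvDrain (d stack : List (String × Int)) : List (String × Int) :=
  if h : d = [] then stack
  else pvDrain d.dropLast (stack ++ [d.getLast h])
termination_by d.length
decreasing_by
  have hp := List.length_pos_of_ne_nil h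
  simp only [List.length_dropLast]
  omega

-- stage 2 of B: `while stack: k, v = stack.pop(); if str(k).isalpha(): sozluk[k] = v`
def pvRebuild (stack d : List (String × Int)) : List (String × Int) :=
  if h : stack = [] then d
  else
    let kv := stack.getLast h
    pvRebuild stack.dropLast (if PySem.Str.strIsalpha kv.1 then pvSetItem d kv.1 kv.2 else d)
termination_by stack.length
decreasing_by
  have hp := List.length_pos_of_ne_nil h
  simp only [List.length_dropLast]
  omega

def alfanumerik_alt (sozluk : List (String × Int)) : List (String × Int) :=
  pvRebuild (pvDrain sozluk []) []

-- ===== PRECONDITION & SPEC =====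
-- Pre_ restricts to association lists with pairwise-distinct keys — exactly the lists that
-- encode a Python dict (A's argument is a dict, so no input A accepts is excluded).
def Pre_alfanumerik (sozluk : List (String × Int)) : Prop :=
  (sozluk.map Prod.fst).Nodup
instance (sozluk : List (String × Int)) : Decidable (Pre_alfanumerik sozluk) := by
  unfold Pre_alfanumerik; infer_instance

def pvWitness_alfanumerik : (List (String × Int)) := [("ab", 1), ("a1", 2), ("c", 3)]

def Spec_alfanumerik (sozluk : List (String × Int)) (out : List (String × Int)) : Prop := out = alfanumerik_alt sozluk
instance (sozluk : List (String × Int)) (out : List (String × Int)) : Decidable (Spec_alfanumerik sozluk out) := by unfold Spec_alfanumerik; infer_instance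

-- ===== CLAIM (what is proved, stated in full; the proofs are below) =====
def Claim_equal_alfanumerik : Prop := ∀ (sozluk : List (String × Int)), Dom_alfanumerik sozluk → Pre_alfanumerik sozluk → Spec_alfanumerik sozluk (alfanumerik sozluk)

-- ===== LEMMAS AND PROOFS =====

-- A's pop loop removes exactly the entries whose key is in ks
theorem pv_foldl_erase (ks : List String) (l : List (String × Int)) :
    ks.foldl
      (fun d key =>
        if (d.map Prod.fst).contains key then d.filter (fun kv => kv.1 != key) else d)
      l
    = l.filter (fun kv => !ks.contains kv.1) := by
  induction ks generalizing l with
  | nil => simp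
  | cons k ks ih =>
      have hstep :
          (if (l.map Prod.fst).contains k then l.filter (fun kv => kv.1 != k) else l)
          = l.filter (fun kv => kv.1 != k) := by
        split_ifs with h
        · rfl
        · symm
          apply List.filter_eq_self.mpr
          intro kv hkv
          simp only [List.contains_eq_mem] at h
          have h' : k ∉ l.map Prod.fst := by simpa using h
          have hne : kv.1 ≠ k := fun he => h' (he ▸ List.mem_map.mpr ⟨kv, hkv, rfl⟩)
          simpa [bne] using hne
      simp only [List.foldl_cons, hstep, ih, List.filter_filter]
      apply List.filter_congr
      intro kv _
      by_cases h1 : kv.1 = k <;> simp [h1]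

-- A's value is the filter of the alphabetic entries
theorem pv_a_eq_filter (sozluk : List (String × Int)) :
    alfanumerik sozluk = sozluk.filter (fun kv => PySem.Str.strIsalpha kv.1) := by
  have hks : ((sozluk.map Prod.fst).foldl
      (fun acc key => if !(PySem.Str.strIsalpha key) then acc ++ [key] else acc) [])
      = (sozluk.map Prod.fst).filter (fun key => !PySem.Str.strIsalpha key) := by
    induction sozluk.map Prod.fst using List.reverseRecOn with
    | nil => rfl
    | append_singleton xs x ih =>
        rw [List.foldl_append, List.foldl_cons, List.foldl_nil, ih, List.filter_append]
        by_cases h : (!PySem.Str.strIsalpha x) = true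
        · rw [if_pos h, List.filter_singleton, h, Bool.cond_true]
        · have hf : (!PySem.Str.strIsalpha x) = false := by
            cases hb : (!PySem.Str.strIsalpha x)
            · rfl
            · exact absurd hb h
          rw [if_neg h, List.filter_singleton, hf, Bool.cond_false, List.append_nil]
  have hA : alfanumerik sozluk
      = sozluk.filter (fun kv =>
          !(((sozluk.map Prod.fst).filter (fun key => !PySem.Str.strIsalpha key)).contains kv.1)) := by
    simp only [alfanumerik]
    rw [hks, pv_foldl_erase]
  rw [hA]
  apply List.filter_congr
  intro kv hkv
  have h1 : kv.1 ∈ sozluk.map Prod.fst := List.mem_map.mpr ⟨kv, hkv, rfl⟩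
  by_cases h : PySem.Str.strIsalpha kv.1
  · have : kv.1 ∉ (sozluk.map Prod.fst).filter (fun key => !PySem.Str.strIsalpha key) := by
      intro hc
      have := (List.mem_filter.mp hc).2
      rw [h] at this
      simp at this
    rw [List.contains_eq_mem, decide_eq_false this, h]
    rfl
  · have hf : PySem.Str.strIsalpha kv.1 = false := by
      cases hb : PySem.Str.strIsalpha kv.1
      · rfl
      · exact absurd hb h
    have hm : kv.1 ∈ (sozluk.map Prod.fst).filter (fun key => !PySem.Str.strIsalpha key) :=
      List.mem_filter.mpr ⟨h1, by rw [hf]; rfl⟩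
    rw [List.contains_eq_mem, decide_eq_true hm, hf]
    rfl

-- the drain loop dumps the dict, last item first, onto the stack
theorem pv_drain_eq (d stack : List (String × Int)) :
    pvDrain d stack = stack ++ d.reverse := by
  induction d using List.reverseRecOn generalizing stack with
  | nil => simp [pvDrain]
  | append_singleton xs x ih =>
      rw [pvDrain]
      simp only [List.append_ne_nil_of_right_ne_nil xs (by simp : [x] ≠ ([] : List (String × Int)))]
      rw [dif_neg (by simp)]
      simp [ih]

-- popping the stack (built as l.reverse) replays l front-to-back
theorem pv_rebuild_rev (l d : List (String × Int)) :
    pvRebuild l.reverse d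
      = l.foldl (fun d kv => if PySem.Str.strIsalpha kv.1 then pvSetItem d kv.1 kv.2 else d) d := by
  induction l generalizing d with
  | nil => simp [pvRebuild]
  | cons a t ih =>
      rw [pvRebuild]
      have hne : (a :: t).reverse ≠ [] := by simp
      rw [dif_neg hne]
      have h1 : (a :: t).reverse.getLast hne = a := by
        simp [List.getLast_eq_getElem]
      have h2 : (a :: t).reverse.dropLast = t.reverse := by
        rw [List.reverse_cons, List.dropLast_concat]
      rw [h1, h2, ih, List.foldl_cons]

-- setting a fresh key just appends
theorem pv_setItem_fresh (d : List (String × Int)) (k : String) (v : Int)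
    (h : k ∉ d.map Prod.fst) : pvSetItem d k v = d ++ [(k, v)] := by
  unfold pvSetItem
  rw [if_neg (by simpa [List.contains_eq_mem] using h)]

-- the rebuild fold over a key-nodup list disjoint from d appends the alphabetic survivors
theorem pv_fold_insert (l d : List (String × Int))
    (hnd : (l.map Prod.fst).Nodup)
    (hdisj : ∀ kv ∈ l, kv.1 ∉ d.map Prod.fst) :
    l.foldl (fun d kv => if PySem.Str.strIsalpha kv.1 then pvSetItem d kv.1 kv.2 else d) d
      = d ++ l.filter (fun kv => PySem.Str.strIsalpha kv.1) := by
  induction l generalizing d with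
  | nil => simp
  | cons a t ih =>
      rw [List.foldl_cons]
      have hnd' : (t.map Prod.fst).Nodup := (List.nodup_cons.mp (by simpa using hnd)).2
      have ha : a.1 ∉ t.map Prod.fst := (List.nodup_cons.mp (by simpa using hnd)).1
      by_cases h : PySem.Str.strIsalpha a.1
      · rw [if_pos h, pv_setItem_fresh d a.1 a.2 (hdisj a (List.mem_cons_self))]
        rw [ih (d ++ [(a.1, a.2)]) hnd' ?_]
        · rw [List.filter_cons, if_pos h]
          simp
        · intro kv hkv
          simp only [List.map_append, List.mem_append] at *
          rintro (hc | hc)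
          · exact hdisj kv (List.mem_cons_of_mem a hkv) hc
          · simp only [List.map_cons, List.map_nil, List.mem_cons] at hc
            rcases hc with hc | hc
            · exact ha (hc ▸ List.mem_map.mpr ⟨kv, hkv, rfl⟩)
            · exact absurd hc (List.not_mem_nil)
      · rw [if_neg h, ih d hnd' (fun kv hkv => hdisj kv (List.mem_cons_of_mem a hkv))]
        rw [List.filter_cons, if_neg h]

-- ===== VERDICT (by name: the statement is the Claim_ definition above) =====
theorem alfanumerik_spec : Claim_equal_alfanumerik := by
  intro sozluk _ hpre
  unfold Spec_alfanumerik
  rw [pv_a_eq_filter]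
  unfold alfanumerik_alt
  rw [pv_drain_eq, List.nil_append, pv_rebuild_rev, pv_fold_insert sozluk [] hpre (by simp)]
  simp
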